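-- pv_equiv track=rewrite | github.com/martinaoliver/TuringGrowthAtlas | fullPipelineCode/Atlas_results_processing.py | FilterNone
-- ===== SOURCE A (Python) =====
-- def FilterNone(results):
--     binme = {}
--     for i in results:
--         if results[i]['concs'] == None:
--             binme[i] = results[i]
--     for i in binme:
--         results.pop(i)
--     return(results)
-- ===== SOURCE B (Python) =====
-- def FilterNone(results):
--     # Fixpoint deletion: repeatedly scan for the FIRST entry whose concs is None
--     # and pop it, until no such entry remains (mutates `results` in place).
--     while True:
--         bad = next((k for k, v in results.items() if v['concs'] == None), None)
--         if bad is None: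
--             return results
--         results.pop(bad)
-- ===== Notes on version B (the rewrite author's own statement) =====
-- stated objective: alternative
-- what changed: B replaces A's single pass that partitions entries into a second dict and then pops the collected keys with a fixpoint while-loop that rescans the dict for the first offending entry and pops it, repeating until no entry with concs None remains.
import Mathlib
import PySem

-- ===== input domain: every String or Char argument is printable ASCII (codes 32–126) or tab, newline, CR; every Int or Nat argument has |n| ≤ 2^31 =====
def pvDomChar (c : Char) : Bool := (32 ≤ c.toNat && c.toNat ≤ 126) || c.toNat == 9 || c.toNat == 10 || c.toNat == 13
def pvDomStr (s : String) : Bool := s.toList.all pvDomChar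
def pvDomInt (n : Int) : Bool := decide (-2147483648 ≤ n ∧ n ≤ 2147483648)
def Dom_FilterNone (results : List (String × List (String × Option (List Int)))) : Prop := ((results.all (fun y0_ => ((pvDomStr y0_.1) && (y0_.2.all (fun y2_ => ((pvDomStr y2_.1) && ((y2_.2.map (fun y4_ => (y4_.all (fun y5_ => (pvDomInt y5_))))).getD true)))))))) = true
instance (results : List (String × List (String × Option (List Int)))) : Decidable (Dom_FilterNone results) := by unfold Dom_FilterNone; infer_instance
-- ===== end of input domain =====

-- B removes entries by a fixpoint while-loop (find the first entry whose concs is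
-- None, pop it, rescan until none remains) instead of A's single pass that collects
-- the doomed keys and then pops them; both mutate `results` in place and the RETURN
-- value is what is proved equal here.

-- ===== PORT A =====
def FilterNone (results : List (String × List (String × Option (List Int)))) : List (String × List (String × Option (List Int))) :=
  -- binme = {}; for i in results: if results[i]['concs'] == None: binme[i] = results[i]
  let binme : PySem.Dict String (List (String × Option (List Int))) :=
    results.foldl (fun binme kv =>
      match (PySem.Dict.mk results).get? kv.1 with
      | none => binme                -- unreachable: kv.1 is a key of results
      | some v =>
        match (PySem.Dict.mk v).get? "concs" with
        | none => binme              -- Python raises KeyError here (excluded by Pre_)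
        | some c => if c = none then binme.insert kv.1 v else binme) PySem.Dict.empty
  -- for i in binme: results.pop(i)
  (binme.keys.foldl (fun r i => r.erase i) (PySem.Dict.mk results)).items

-- ===== PORT B =====
-- next((k for k, v in results.items() if v['concs'] == None), None)
def pvFindBad : List (String × List (String × Option (List Int))) → Option String
  | [] => none
  | kv :: rest =>
    if (PySem.Dict.mk kv.2).get? "concs" == some (none : Option (List Int)) then some kv.1
    else pvFindBad rest

-- a key pvFindBad returns belongs to the list, so popping it shrinks it (termination)
theorem pvFindBad_pop_lt (l : List (String × List (String × Option (List Int)))) (k : String)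
    (h : pvFindBad l = some k) :
    (((PySem.Dict.mk l).erase k).items).length < l.length := by
  have hmem : ∃ kv ∈ l, kv.1 = k := by
    induction l with
    | nil => simp [pvFindBad] at h
    | cons kv rest ih =>
      by_cases hc : (PySem.Dict.mk kv.2).get? "concs" == some (none : Option (List Int))
      · simp only [pvFindBad, if_pos hc, Option.some.injEq] at h
        exact ⟨kv, List.mem_cons_self, h⟩
      · simp only [pvFindBad, if_neg hc] at h
        obtain ⟨p, hp, hk⟩ := ih h
        exact ⟨p, List.mem_cons_of_mem _ hp, hk⟩
  obtain ⟨kv, hkv, hk⟩ := hmem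
  simp only [PySem.Dict.erase]
  have : ∃ x ∈ l, ¬ ((x.1 == k) = false) := ⟨kv, hkv, by simp [hk]⟩
  exact List.length_filter_lt_length_iff_exists.mpr (by
    obtain ⟨x, hx, hx2⟩ := this
    exact ⟨x, hx, by simpa using hx2⟩)

def FilterNone_alt (results : List (String × List (String × Option (List Int)))) : List (String × List (String × Option (List Int))) :=
  -- while True: bad = next(...); if bad is None: return results; results.pop(bad)
  match h : pvFindBad results with
  | none => results
  | some k => FilterNone_alt (((PySem.Dict.mk results).erase k).items)
termination_by results.length
decreasing_by exact pvFindBad_pop_lt results k h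

-- ===== PRECONDITION & SPEC =====
-- Pre_ excludes (a) inputs where some inner dict has no 'concs' key, on which A raises
-- KeyError, and (b) assoc lists with duplicate keys (outer or inner), which do not
-- represent any Python dict (dict keys are unique): duplicates are an artefact of the
-- assoc-list encoding, not inputs A can receive.
def Pre_FilterNone (results : List (String × List (String × Option (List Int)))) : Prop :=
  (results.map Prod.fst).Nodup ∧
  (∀ kv ∈ results, (kv.2.map Prod.fst).Nodup) ∧
  (∀ kv ∈ results, ((PySem.Dict.mk kv.2).get? "concs").isSome)
instance (results : List (String × List (String × Option (List Int)))) : Decidable (Pre_FilterNone results) := by unfold Pre_FilterNone; infer_instance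

def pvWitness_FilterNone : (List (String × List (String × Option (List Int)))) :=
  [("a", [("concs", some [1])]), ("b", [("concs", none)])]

def Spec_FilterNone (results : List (String × List (String × Option (List Int)))) (out : List (String × List (String × Option (List Int)))) : Prop := out = FilterNone_alt results
instance (results : List (String × List (String × Option (List Int)))) (out : List (String × List (String × Option (List Int)))) : Decidable (Spec_FilterNone results out) := by unfold Spec_FilterNone; infer_instance

-- ===== CLAIM (what is proved, stated in full; the proofs are below) =====
def Claim_equal_FilterNone : Prop := ∀ (results : List (String × List (String × Option (List Int)))), Dom_FilterNone results → Pre_FilterNone results → Spec_FilterNone results (FilterNone results)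

-- ===== LEMMAS AND PROOFS =====

-- the 'concs == None' test, as a Boolean on an entry
def pvCond (kv : String × List (String × Option (List Int))) : Bool :=
  (PySem.Dict.mk kv.2).get? "concs" == some (none : Option (List Int))

-- two entries of a list with Nodup keys that share a key are the same entry
theorem pv_eq_of_nodup_keys {α β : Type} {l : List (α × β)} (h : (l.map Prod.fst).Nodup)
    {a b : α × β} (ha : a ∈ l) (hb : b ∈ l) (hfst : a.1 = b.1) : a = b := by
  induction l with
  | nil => cases ha
  | cons x l ih =>
    simp only [List.map_cons, List.nodup_cons] at h
    rcases List.mem_cons.mp ha with ha | ha <;> rcases List.mem_cons.mp hb with hb | hb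
    · rw [ha, hb]
    · have hm : b.1 ∈ l.map Prod.fst := List.mem_map_of_mem hb
      rw [← hfst, ha] at hm; exact absurd hm h.1
    · have hm : a.1 ∈ l.map Prod.fst := List.mem_map_of_mem ha
      rw [hfst, hb] at hm; exact absurd hm h.1
    · exact ih h.2 ha hb

-- pvFindBad returns none exactly when no entry satisfies the test
theorem pvFindBad_none {l : List (String × List (String × Option (List Int)))}
    (h : pvFindBad l = none) : ∀ kv ∈ l, pvCond kv = false := by
  induction l with
  | nil => intro kv hm; cases hm
  | cons kv rest ih =>
    by_cases hc : (PySem.Dict.mk kv.2).get? "concs" == some (none : Option (List Int))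
    · simp only [pvFindBad, if_pos hc] at h
      cases h
    · simp only [pvFindBad, if_neg hc] at h
      intro p hp
      rcases List.mem_cons.mp hp with hp | hp
      · subst hp; simpa [pvCond] using hc
      · exact ih h p hp

-- pvFindBad returns the key of some entry satisfying the test
theorem pvFindBad_some {l : List (String × List (String × Option (List Int)))} {k : String}
    (h : pvFindBad l = some k) : ∃ kv ∈ l, kv.1 = k ∧ pvCond kv = true := by
  induction l with
  | nil => simp [pvFindBad] at h
  | cons kv rest ih =>
    by_cases hc : (PySem.Dict.mk kv.2).get? "concs" == some (none : Option (List Int))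
    · simp only [pvFindBad, if_pos hc, Option.some.injEq] at h
      exact ⟨kv, List.mem_cons_self, h, by simpa [pvCond] using hc⟩
    · simp only [pvFindBad, if_neg hc] at h
      obtain ⟨p, hp, hk, hcnd⟩ := ih h
      exact ⟨p, List.mem_cons_of_mem _ hp, hk, hcnd⟩

-- B's fixpoint loop computes the keep-filter, under unique outer keys
theorem pvB_fix_aux (n : Nat) : ∀ (l : List (String × List (String × Option (List Int)))),
    l.length ≤ n → (l.map Prod.fst).Nodup →
    FilterNone_alt l = l.filter (fun kv => !pvCond kv) := by
  induction n with
  | zero =>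
    intro l hl _
    have : l = [] := List.eq_nil_of_length_eq_zero (Nat.le_zero.mp hl)
    subst this
    rw [FilterNone_alt]
    rfl
  | succ n ih =>
    intro l hl hnd
    rw [FilterNone_alt]
    split
    · next heq =>
      have hall := pvFindBad_none heq
      exact (List.filter_eq_self.mpr (fun kv hm => by simp [hall kv hm])).symm
    · next k heq =>
      obtain ⟨bad, hbadm, hbadk, hbadc⟩ := pvFindBad_some heq
      have hlen := pvFindBad_pop_lt l k heq
      have hnd' : ((((PySem.Dict.mk l).erase k).items).map Prod.fst).Nodup := by
        simp only [PySem.Dict.erase]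
        exact List.Nodup.sublist (List.Sublist.map Prod.fst List.filter_sublist) hnd
      rw [ih _ (by omega) hnd']
      simp only [PySem.Dict.erase, List.filter_filter]
      apply List.filter_congr
      intro kv hm
      by_cases hc : pvCond kv = true
      · simp [hc]
      · have hk : kv.1 ≠ k := by
          intro hkk
          have : kv = bad := pv_eq_of_nodup_keys hnd hm hbadm (by rw [hkk, hbadk])
          rw [this] at hc; exact hc hbadc
        simp only [Bool.not_eq_true] at hc
        simp [hc, hk]

theorem pvB_fix (l : List (String × List (String × Option (List Int))))
    (hnd : (l.map Prod.fst).Nodup) :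
    FilterNone_alt l = l.filter (fun kv => !pvCond kv) :=
  pvB_fix_aux l.length l (Nat.le_refl _) hnd

-- A's first loop: under Pre_, binme's items are the bin-filter
theorem pvA_loop1 (results l : List (String × List (String × Option (List Int))))
    (acc : PySem.Dict String (List (String × Option (List Int))))
    (hlk : ∀ kv ∈ l, (PySem.Dict.mk results).get? kv.1 = some kv.2)
    (hnd : (acc.keys ++ l.map Prod.fst).Nodup) :
    (l.foldl (fun binme kv =>
      match (PySem.Dict.mk results).get? kv.1 with
      | none => binme
      | some v =>
        match (PySem.Dict.mk v).get? "concs" with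
        | none => binme
        | some c => if c = none then binme.insert kv.1 v else binme) acc).items
      = acc.items ++ l.filter pvCond := by
  induction l generalizing acc with
  | nil => simp
  | cons kv l ih =>
    have hsub : (acc.keys ++ l.map Prod.fst).Nodup :=
      List.Nodup.sublist (List.Sublist.append_left (List.sublist_cons_self kv.1 _) acc.keys) hnd
    have hlk' : ∀ p ∈ l, (PySem.Dict.mk results).get? p.1 = some p.2 :=
      fun p hp => hlk p (List.mem_cons_of_mem _ hp)
    simp only [List.foldl_cons, List.filter_cons, hlk kv (List.mem_cons_self)]
    cases h : (PySem.Dict.mk kv.2).get? "concs" with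
    | none =>
      have hcnd : pvCond kv = false := by simp [pvCond, h]
      simp only [hcnd, Bool.false_eq_true, if_false]
      exact ih acc hlk' hsub
    | some c =>
      by_cases hc : c = none
      · subst hc
        have hcnd : pvCond kv = true := by simp [pvCond, h]
        have hnc : kv.1 ∉ acc.keys := by
          have hd := List.disjoint_of_nodup_append hnd
          exact fun hm => hd hm (List.mem_cons_self)
        have hcont : acc.contains kv.1 = false := by
          rw [PySem.Dict.contains_eq_decide_mem_keys]; simpa using hnc
        have hkeys := PySem.Dict.keys_insert_of_not_contains acc kv.2 hcont
        have hnd' : ((acc.insert kv.1 kv.2).keys ++ l.map Prod.fst).Nodup := by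
          rw [hkeys, List.append_assoc, List.singleton_append]; exact hnd
        simp only [hcnd, if_true]
        rw [ih _ hlk' hnd', PySem.Dict.items_insert_of_not_contains _ _ hcont]
        simp [List.append_assoc]
      · have hcnd : pvCond kv = false := by
          simp only [pvCond, h]
          simpa [Option.isSome_iff_ne_none] using hc
        simp only [if_neg hc, hcnd, Bool.false_eq_true, if_false]
        exact ih acc hlk' hsub

-- A's second loop: popping every key in K filters the dict
theorem pvA_loop2 {ν : Type} (K : List String) (d : PySem.Dict String ν) :
    (K.foldl (fun r i => r.erase i) d).items
      = d.items.filter (fun kv => !K.contains kv.1) := by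
  induction K generalizing d with
  | nil => simp
  | cons k K ih =>
    rw [List.foldl_cons, ih (d.erase k)]
    simp only [PySem.Dict.erase, List.filter_filter]
    apply List.filter_congr
    intro kv _
    by_cases hk : kv.1 = k
    · simp [hk]
    · simp [hk]

-- ===== VERDICT (by name: the statement is the Claim_ definition above) =====
theorem FilterNone_spec : Claim_equal_FilterNone := by
  intro results _hdom hpre
  obtain ⟨hnd, _hinner, hconcs⟩ := hpre
  show FilterNone results = FilterNone_alt results
  have hlk : ∀ kv ∈ results, (PySem.Dict.mk results).get? kv.1 = some kv.2 := by
    intro kv hm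
    exact PySem.Dict.get?_of_mem_items (PySem.Dict.mk results) hm hnd
  have hnd0 : ((PySem.Dict.empty : PySem.Dict String (List (String × Option (List Int)))).keys ++ results.map Prod.fst).Nodup := by
    simpa using hnd
  have hA1 := pvA_loop1 results results PySem.Dict.empty hlk hnd0
  have hemp : (PySem.Dict.empty : PySem.Dict String (List (String × Option (List Int)))).items = [] := rfl
  simp only [hemp, List.nil_append] at hA1
  -- A's pop loop erases exactly the binned keys, leaving the keep-filter
  have hA2 : FilterNone results = results.filter (fun kv => !pvCond kv) := by
    unfold FilterNone
    rw [pvA_loop2]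
    simp only [PySem.Dict.keys, hA1]
    apply List.filter_congr
    intro kv hm
    congr 1
    have hiff : kv.1 ∈ (results.filter pvCond).map Prod.fst ↔ pvCond kv = true := by
      constructor
      · intro hmem
        obtain ⟨x, hxf, hx1⟩ := List.mem_map.mp hmem
        obtain ⟨hxr, hxc⟩ := List.mem_filter.mp hxf
        have hx := pv_eq_of_nodup_keys hnd hxr hm hx1
        rwa [← hx]
      · intro hc
        exact List.mem_map_of_mem (List.mem_filter.mpr ⟨hm, hc⟩)
    by_cases hc : pvCond kv = true
    · simpa [hc] using hiff.mpr hc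
    · simp only [Bool.not_eq_true] at hc
      simp [hc]
      simpa [hc] using fun h => hiff.mp h
  rw [hA2, pvB_fix results hnd]
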